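-- pv_equiv track=rewrite | github.com/Tiddles76/Hello | GEXP_List/gexp_puller.py | _pseudo_priority_bonus_for_codes
-- ===== SOURCE A (Python) =====
-- from typing import Dict, List, Any, Optional, Tuple
--
-- PSEUDO_PRIORITY_BONUSES: Dict[str, int] = {
--     "LB": 10,
-- }
--
-- def _normalize_code(code: str) -> str:
--     return "".join(ch for ch in code.strip().upper() if ch.isalnum() or ch in ("_", "-"))[:12]
--
-- def _pseudo_priority_bonus_for_codes(codes: List[str]) -> int:
--     """
--     Sums any configured bonuses for pseudo codes.
--     ✅ Guarantees LB always contributes +10 if present.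
--     """
--     norm = [_normalize_code(str(c)) for c in (codes or [])]
--     norm = [c for c in norm if c]
--
--     total = 0
--     for cc in norm:
--         total += int(PSEUDO_PRIORITY_BONUSES.get(cc, 0))
--
--     if "LB" in norm:
--         configured = int(PSEUDO_PRIORITY_BONUSES.get("LB", 0))
--         guaranteed = max(configured, 10)
--         if configured < guaranteed:
--             total += (guaranteed - configured)
--
--     return int(total)
-- ===== SOURCE B (Python) =====
-- from typing import Dict, List
--
-- PSEUDO_PRIORITY_BONUSES: Dict[str, int] = {
--     "LB": 10,
-- }
--
-- def _keep(ch: str) -> bool: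
--     return ch.isalnum() or ch == "_" or ch == "-"
--
-- def _norm(code: str) -> str:
--     # collect kept characters, stopping as soon as 12 are gathered
--     out = []
--     for ch in code.strip().upper():
--         if _keep(ch):
--             out.append(ch)
--             if len(out) == 12:
--                 break
--     return "".join(out)
--
-- def _pseudo_priority_bonus_for_codes(codes: List[str]) -> int:
--     # frequency map of the normalized, non-empty codes, built in one pass
--     counts = {}
--     for c in codes:
--         k = _norm(str(c))
--         if k:
--             counts[k] = counts.get(k, 0) + 1
--     # table-driven total: iterate the bonus table, not the codes
--     return sum(counts.get(code, 0) * bonus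
--                for code, bonus in PSEUDO_PRIORITY_BONUSES.items())
-- ===== Notes on version B (the rewrite author's own statement) =====
-- stated objective: alternative
-- what changed: B builds a frequency map of normalized codes in one pass and sums count*bonus by iterating the bonus table (with an early-stopping 12-char normalizer), dropping A's per-code dict lookups and its no-op LB-guarantee block.
import Mathlib
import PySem

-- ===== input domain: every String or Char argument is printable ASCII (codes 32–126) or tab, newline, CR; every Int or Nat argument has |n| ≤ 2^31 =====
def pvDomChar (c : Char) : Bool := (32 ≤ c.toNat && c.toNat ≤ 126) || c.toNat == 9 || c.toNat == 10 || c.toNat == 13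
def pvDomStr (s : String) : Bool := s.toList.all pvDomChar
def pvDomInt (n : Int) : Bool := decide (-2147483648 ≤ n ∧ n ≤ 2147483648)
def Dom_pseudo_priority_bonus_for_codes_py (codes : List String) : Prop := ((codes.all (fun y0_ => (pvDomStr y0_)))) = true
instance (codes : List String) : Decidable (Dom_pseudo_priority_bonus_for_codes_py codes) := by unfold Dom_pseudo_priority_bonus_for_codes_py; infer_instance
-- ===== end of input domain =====

-- B replaces A's per-code dict lookups and no-op LB-guarantee block by a one-pass frequency map
-- of normalized codes summed against the bonus table (objective: alternative decomposition).

-- ===== PORT A =====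
def pvBonusesA : PySem.Dict String Int := PySem.Dict.ofList [("LB", 10)]

-- "".join(ch for ch in code.strip().upper() if ch.isalnum() or ch in ("_","-"))[:12]
def normalize_code_py (code : String) : String :=
  String.mk (PySem.List.slice
    ((PySem.Chars.upper (PySem.Chars.strip code.toList)).filter
      (fun ch => PySem.Chars.isalnum ch || ch == '_' || ch == '-'))
    none (some 12))

def pseudo_priority_bonus_for_codes_py (codes : List String) : Int :=
  let norm := (if codes.isEmpty then [] else codes).map (fun c => normalize_code_py c)
  let norm := norm.filter (fun c => !(c == ""))
  let total : Int := norm.foldl (fun t cc => t + pvBonusesA.getD cc 0) 0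
  let total := if norm.contains "LB" then
      let configured := pvBonusesA.getD "LB" 0
      let guaranteed := max configured 10
      if configured < guaranteed then total + (guaranteed - configured) else total
    else total
  total

-- ===== PORT B =====
def pvBonusesB : PySem.Dict String Int := PySem.Dict.ofList [("LB", 10)]

def pvKeep (ch : Char) : Bool := PySem.Chars.isalnum ch || ch == '_' || ch == '-'

-- the for-loop of _norm: append kept chars, break once 12 are collected
def pvCollect (out : List Char) : List Char → List Char
  | [] => out
  | ch :: rest =>
    if pvKeep ch then
      let out' := out ++ [ch]
      if out'.length == 12 then out' else pvCollect out' rest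
    else pvCollect out rest

def norm_alt (code : String) : String :=
  String.mk (pvCollect [] (PySem.Chars.upper (PySem.Chars.strip code.toList)))

def pseudo_priority_bonus_for_codes_py_alt (codes : List String) : Int :=
  let counts : PySem.Dict String Int := codes.foldl (fun d c =>
      let k := norm_alt c
      if !(k == "") then d.modify k 0 (· + 1) else d) PySem.Dict.empty
  pvBonusesB.items.foldl (fun t p => t + counts.getD p.1 0 * p.2) 0

-- ===== PRECONDITION & SPEC =====
def Spec_pseudo_priority_bonus_for_codes_py (codes : List String) (out : Int) : Prop := out = pseudo_priority_bonus_for_codes_py_alt codes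
instance (codes : List String) (out : Int) : Decidable (Spec_pseudo_priority_bonus_for_codes_py codes out) := by unfold Spec_pseudo_priority_bonus_for_codes_py; infer_instance

-- ===== CLAIM (what is proved, stated in full; the proofs are below) =====
def Claim_equal_pseudo_priority_bonus_for_codes_py : Prop := ∀ (codes : List String), Dom_pseudo_priority_bonus_for_codes_py codes → Spec_pseudo_priority_bonus_for_codes_py codes (pseudo_priority_bonus_for_codes_py codes)

-- ===== LEMMAS AND PROOFS =====

-- the early-break collector is filter-then-take-12
lemma pvCollect_eq (l : List Char) : ∀ (out : List Char), out.length < 12 →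
    pvCollect out l = out ++ (l.filter pvKeep).take (12 - out.length) := by
  induction l with
  | nil => intro out h; simp [pvCollect]
  | cons ch rest ih =>
    intro out h
    by_cases hk : pvKeep ch
    · simp only [pvCollect, hk, if_true]
      by_cases h12 : (out ++ [ch]).length == 12
      · simp only [h12, if_true]
        have : out.length = 11 := by simp at h12; omega
        simp [hk, this, List.take_succ_cons]
      · simp only [h12]
        have hlt : (out ++ [ch]).length < 12 := by
          simp at h12 ⊢; omega
        rw [ih _ hlt]
        have : 12 - out.length = (12 - (out ++ [ch]).length) + 1 := by simp at hlt ⊢; omega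
        simp [hk, this, List.take_succ_cons]
    · simp [pvCollect, hk, ih _ h]

lemma norm_alt_eq (code : String) : norm_alt code = normalize_code_py code := by
  unfold norm_alt normalize_code_py
  rw [pvCollect_eq _ [] (by simp)]
  unfold pvKeep
  simp [pysem]

lemma getD_bonusesA (cc : String) :
    pvBonusesA.getD cc 0 = if cc = "LB" then (10 : Int) else 0 := by
  have : pvBonusesA = PySem.Dict.empty.insert "LB" 10 := by decide
  rw [this, PySem.Dict.getD_insert]
  split_ifs <;> simp [PySem.Dict.getD_empty]

-- A's summing loop counts 10 per "LB"
lemma foldlA_eq (l : List String) : ∀ (t : Int),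
    l.foldl (fun t cc => t + pvBonusesA.getD cc 0) t = t + 10 * (l.count "LB" : Int) := by
  induction l with
  | nil => intro t; simp
  | cons c rest ih =>
    intro t
    rw [List.foldl_cons, ih, getD_bonusesA, List.count_cons]
    by_cases h : c = "LB" <;> simp [h] <;> ring

-- B's conditional counting loop is the unconditional counter over the filtered mapped list
lemma foldlB_eq (l : List String) : ∀ (d : PySem.Dict String Int),
    l.foldl (fun d c =>
      let k := norm_alt c
      if !(k == "") then d.modify k 0 (· + 1) else d) d
    = ((l.map norm_alt).filter (fun k => !(k == ""))).foldl
        (fun d k => d.modify k 0 (· + 1)) d := by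
  induction l with
  | nil => intro d; simp
  | cons c rest ih =>
    intro d
    simp only [List.foldl_cons, List.map_cons, List.filter_cons]
    by_cases h : (!(norm_alt c == "")) = true
    · simp only [h, if_true, List.foldl_cons, ih]
    · simp only [h, ih]
      simp at h
      simp

-- ===== VERDICT (by name: the statement is the Claim_ definition above) =====
theorem pseudo_priority_bonus_for_codes_py_spec : Claim_equal_pseudo_priority_bonus_for_codes_py := by
  intro codes _
  unfold Spec_pseudo_priority_bonus_for_codes_py
  unfold pseudo_priority_bonus_for_codes_py pseudo_priority_bonus_for_codes_py_alt
  have hsrc : (if codes.isEmpty then [] else codes) = codes := by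
    cases codes <;> simp
  rw [hsrc, foldlB_eq]
  simp only [funext fun c => norm_alt_eq c]
  rw [foldlA_eq]
  have hitems : pvBonusesB.items = [("LB", (10 : Int))] := by decide
  rw [hitems]
  simp only [List.foldl_cons, List.foldl_nil]
  rw [PySem.Dict.getD_foldl_modify_add_one, PySem.Dict.getD_empty]
  simp only [getD_bonusesA]
  norm_num
  ring
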